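-- pv_equiv track=rewrite | github.com/costadanilofreitas/pos-structure | mwdatas/data.client/server/bundles/pyscripts/python/pyscriptscache.py | _get_all_product_contexts
-- ===== SOURCE A (Python) =====
-- def _get_all_product_contexts(current_context):
--     contexts = []
--     index = 0
--
--     while index >= 0:
--         contexts.append(current_context)
--         index = current_context.find('.')
--         current_context = current_context[index + 1:]
--
--     contexts.append("")
--     return contexts
-- ===== SOURCE B (Python) =====
-- def _get_all_product_contexts(current_context):
--     parts = current_context.split('.')
--     contexts = ['.'.join(parts[i:]) for i in range(len(parts))]
--     contexts.append("")
--     return contexts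
-- ===== Notes on version B (the rewrite author's own statement) =====
-- stated objective: simpler
-- what changed: Replaces the incremental find/slice while-loop with a single split on the dot separator followed by rejoining each tail slice of the parts list (plus the final empty string).
import Mathlib
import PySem

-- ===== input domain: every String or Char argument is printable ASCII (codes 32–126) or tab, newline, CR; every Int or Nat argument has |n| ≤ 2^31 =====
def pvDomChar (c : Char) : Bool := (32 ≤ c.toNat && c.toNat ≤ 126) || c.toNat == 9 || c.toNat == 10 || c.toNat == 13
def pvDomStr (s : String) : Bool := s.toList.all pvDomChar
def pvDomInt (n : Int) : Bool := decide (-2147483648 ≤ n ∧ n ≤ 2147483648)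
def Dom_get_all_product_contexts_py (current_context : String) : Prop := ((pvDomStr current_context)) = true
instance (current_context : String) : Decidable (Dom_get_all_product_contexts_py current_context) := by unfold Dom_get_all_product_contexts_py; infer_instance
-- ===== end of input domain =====

-- B replaces A's incremental find/slice while-loop by splitting on '.' once and rejoining tail slices (simpler decomposition, same result).

-- ===== PORT A =====
-- A's while loop: append the current string, find the first '.', slice past it; repeat while find returned ≥ 0.
def pvLoopA (cs : List Char) : List (List Char) :=
  if h : 0 ≤ PySem.Chars.find cs ['.'] then
    cs :: pvLoopA (PySem.List.slice cs (some (PySem.Chars.find cs ['.'] + 1)) none)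
  else
    [cs]
termination_by cs.length
decreasing_by
  have hs := (PySem.Chars.find_spec (s := cs) (sub := ['.']) h).1
  have hlt : (PySem.Chars.find cs ['.']).toNat < cs.length := by
    by_contra hge
    rw [List.drop_eq_nil_of_le (by omega)] at hs
    exact List.cons_ne_nil _ _ (List.prefix_nil.mp hs)
  rw [PySem.List.slice_from _ (by omega), List.length_drop]
  omega

def get_all_product_contexts_py (current_context : String) : List String :=
  (pvLoopA current_context.toList).map String.ofList ++ [""]

-- ===== PORT B =====
def get_all_product_contexts_py_alt (current_context : String) : List String :=
  let parts := PySem.Chars.splitOn current_context.toList ['.']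
  let contexts := (PySem.List.pyRange 0 (parts.length : Int)).map
    (fun i => String.ofList (PySem.Chars.join ['.'] (PySem.List.slice parts (some i) none)))
  contexts ++ [""]

-- ===== PRECONDITION & SPEC =====
def Spec_get_all_product_contexts_py (current_context : String) (out : List String) : Prop := out = get_all_product_contexts_py_alt current_context
instance (current_context : String) (out : List String) : Decidable (Spec_get_all_product_contexts_py current_context out) := by unfold Spec_get_all_product_contexts_py; infer_instance

-- ===== CLAIM (what is proved, stated in full; the proofs are below) =====
def Claim_equal_get_all_product_contexts_py : Prop := ∀ (current_context : String), Dom_get_all_product_contexts_py current_context → Spec_get_all_product_contexts_py current_context (get_all_product_contexts_py current_context)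

-- ===== LEMMAS AND PROOFS =====

-- structural reference for splitting on '.'
def pvSp : List Char → List (List Char)
  | [] => [[]]
  | c :: t =>
    if c = '.' then [] :: pvSp t
    else
      match pvSp t with
      | [] => [[c]]   -- unreachable: pvSp is never []
      | h :: r => (c :: h) :: r

theorem pvSp_ne_nil (cs : List Char) : pvSp cs ≠ [] := by
  cases cs with
  | nil => simp [pvSp]
  | cons c t =>
    simp only [pvSp]
    split_ifs
    · simp
    · cases h : pvSp t <;> simp

theorem pvSp_cons_exists (cs : List Char) : ∃ h t, pvSp cs = h :: t := by
  cases hps : pvSp cs with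
  | nil => exact absurd hps (pvSp_ne_nil cs)
  | cons h t => exact ⟨h, t, rfl⟩

theorem pvSp_go (fuel : Nat) (l cur : List Char) (acc : List (List Char))
    (hf : l.length < fuel) :
    PySem.Chars.splitOn.go ['.'] fuel l cur acc
      = acc.reverse ++ (pvSp l).modifyHead (cur.reverse ++ ·) := by
  induction fuel generalizing l cur acc with
  | zero => omega
  | succ f ih =>
    cases l with
    | nil => simp [PySem.Chars.splitOn.go, pvSp, List.modifyHead]
    | cons c rest =>
      rw [PySem.Chars.splitOn.go]
      obtain ⟨h, r, hh⟩ := pvSp_cons_exists rest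
      by_cases hc : c = '.'
      · have hpre : List.isPrefixOf ['.'] (c :: rest) = true := by
          simp [List.isPrefixOf, hc]
        rw [if_pos hpre, ih _ _ _ (by simp at hf ⊢; omega)]
        simp [pvSp, hc, hh, List.modifyHead]
      · have hpre : ¬ List.isPrefixOf ['.'] (c :: rest) = true := by
          simp [List.isPrefixOf]
          exact fun hx => hc hx.symm
        rw [if_neg hpre, ih _ _ _ (by simp at hf ⊢; omega)]
        simp [pvSp, hc, hh, List.modifyHead]

theorem pvSplitOn_eq (cs : List Char) : PySem.Chars.splitOn cs ['.'] = pvSp cs := by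
  rw [PySem.Chars.splitOn, pvSp_go _ _ _ _ (by omega)]
  obtain ⟨h, t, hh⟩ := pvSp_cons_exists cs
  simp [hh, List.modifyHead]

theorem pvJoin_pvSp (cs : List Char) : PySem.Chars.join ['.'] (pvSp cs) = cs := by
  induction cs with
  | nil => simp [pvSp, PySem.Chars.join_singleton]
  | cons c t ih =>
    obtain ⟨h, r, hh⟩ := pvSp_cons_exists t
    rw [hh] at ih
    by_cases hc : c = '.'
    · simp only [pvSp, if_pos hc, hh, PySem.Chars.join_cons_cons]
      simp [hc, ih]
    · simp only [pvSp, if_neg hc, hh]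
      cases r with
      | nil =>
        rw [PySem.Chars.join_singleton] at ih
        rw [PySem.Chars.join_singleton, ih]
      | cons b bs =>
        rw [PySem.Chars.join_cons_cons] at ih
        rw [PySem.Chars.join_cons_cons]
        simp [← ih]

theorem pvSp_no_dot (cs : List Char) (h : '.' ∉ cs) : pvSp cs = [cs] := by
  induction cs with
  | nil => rfl
  | cons c t ih =>
    simp only [List.mem_cons, not_or] at h
    rw [pvSp, if_neg (fun he => h.1 he.symm), ih h.2]

theorem pvSp_split (pre rest : List Char) (h : '.' ∉ pre) :
    pvSp (pre ++ '.' :: rest) = pre :: pvSp rest := by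
  induction pre with
  | nil => simp [pvSp]
  | cons c t ih =>
    simp only [List.mem_cons, not_or] at h
    rw [List.cons_append, pvSp, if_neg (fun he => h.1 he.symm), ih h.2]

theorem pvLoopA_eq (cs : List Char) :
    pvLoopA cs = (List.range (pvSp cs).length).map
      (fun i => PySem.Chars.join ['.'] ((pvSp cs).drop i)) := by
  by_cases h : 0 ≤ PySem.Chars.find cs ['.']
  · have hs := PySem.Chars.find_spec (s := cs) (sub := ['.']) h
    set n := (PySem.Chars.find cs ['.']).toNat with hn
    have hlt : n < cs.length := by
      by_contra hge
      have h1 := hs.1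
      rw [List.drop_eq_nil_of_le (by omega)] at h1
      exact List.cons_ne_nil _ _ (List.prefix_nil.mp h1)
    have hdot : cs.drop n = '.' :: cs.drop (n + 1) := by
      obtain ⟨t, ht⟩ := hs.1
      have h2 : cs.drop (n + 1) = (cs.drop n).drop 1 := by rw [List.drop_drop]
      rw [h2, ← ht]
      simp
    have hnodot : '.' ∉ cs.take n := by
      intro hmem
      obtain ⟨j, hj, hget⟩ := List.getElem_of_mem hmem
      have hjn : j < n := by simp [List.length_take] at hj; omega
      apply hs.2 j hjn
      refine ⟨cs.drop (j + 1), ?_⟩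
      have h1 : cs[j] = '.' := by rw [← List.getElem_take (h := hj)]; exact hget
      rw [List.singleton_append, ← h1, ← List.drop_eq_getElem_cons (by omega)]
    have hsp : pvSp cs = cs.take n :: pvSp (cs.drop (n + 1)) := by
      conv_lhs => rw [← List.take_append_drop n cs, hdot]
      exact pvSp_split _ _ hnodot
    have hslice : PySem.List.slice cs (some (PySem.Chars.find cs ['.'] + 1)) none
        = cs.drop (n + 1) := by
      rw [PySem.List.slice_from _ (by omega)]
      congr 1
      omega
    have ih := pvLoopA_eq (cs.drop (n + 1))
    rw [pvLoopA, dif_pos h, hslice, ih, hsp]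
    simp only [List.length_cons, List.range_succ_eq_map, List.map_cons, List.map_map,
      List.drop_zero, Function.comp_def, List.drop_succ_cons]
    rw [← hsp, pvJoin_pvSp]
  · have hno : '.' ∉ cs := by
      have hne : PySem.Chars.find cs ['.'] = -1 := by
        have := PySem.Chars.neg_one_le_find cs ['.']
        omega
      intro hmem
      exact (PySem.Chars.find_eq_neg_one_iff cs ['.']).mp hne
        ((List.singleton_infix_iff '.' cs).mpr hmem)
    rw [pvLoopA, dif_neg h, pvSp_no_dot cs hno]
    simp [PySem.Chars.join_singleton]
termination_by cs.length
decreasing_by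
  rw [List.length_drop]; omega

-- ===== VERDICT (by name: the statement is the Claim_ definition above) =====
theorem get_all_product_contexts_py_spec : Claim_equal_get_all_product_contexts_py := by
  intro s _
  unfold Spec_get_all_product_contexts_py
  unfold get_all_product_contexts_py get_all_product_contexts_py_alt
  simp only [pvSplitOn_eq, pvLoopA_eq]
  congr 1
  rw [PySem.List.pyRange_zero_natCast]
  simp [List.map_map, PySem.List.slice_from_natCast, Function.comp]
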